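-- pv_equiv track=rewrite | github.com/yieldthought/llmdoc | data.py | parse_grep_output
-- ===== SOURCE A (Python) =====
-- def parse_grep_output(output):
--     """
--     Parse grep output that includes context lines.
--
--     Grep produces groups of lines separated by a line that is exactly '--'.
--     Each line in a group begins with the filename plus a separator (':' for a match
--     or '-' for a context line). Instead of parsing each line individually, this function:
--
--       1. Finds the group's filename by identifying the line that has the earliest colon.
--       2. Uses that filename prefix to trim that many characters (plus one for the separator)
--          from every line in the group.
--       3. Aggregates the trimmed lines as the file's content.
--
--     Returns a list of dictionaries with keys 'file' and 'content'.
--     """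
--     groups = []
--     current_group = []
--     for line in output.splitlines():
--         if line.strip() == "--":
--             if current_group:
--                 groups.append(current_group)
--                 current_group = []
--             continue
--         current_group.append(line)
--     if current_group:
--         groups.append(current_group)
--
--     processed_matches = []
--
--     for group in groups:
--         # Determine the file prefix from the line that has the earliest colon.
--         candidate_prefix = None
--         min_colon_index = None
--         for line in group:
--             colon_index = line.find(':')
--             if colon_index != -1:
--                 if min_colon_index is None or colon_index < min_colon_index:
--                     min_colon_index = colon_index
--                     candidate_prefix = line[:colon_index]
--         if candidate_prefix is None:
--             # No line with colon found; skip this group.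
--             continue
--
--         # Calculate the number of characters to trim:
--         # the length of the candidate_prefix plus one (for the separator)
--         trim_length = len(candidate_prefix) + 1
--
--         # Process each line in the group that starts with candidate_prefix.
--         content_lines = []
--         for line in group:
--             if line.startswith(candidate_prefix):
--                 # Trim the prefix and the separator.
--                 content_lines.append(line[trim_length:])
--             else:
--                 # If the line doesn't start with the prefix, include it as-is.
--                 content_lines.append(line)
--
--         processed_matches.append({
--             'file': candidate_prefix,
--             'content': '\n'.join(content_lines)
--         })
--
--     return processed_matches
-- ===== SOURCE B (Python) =====
-- def _match(block):
--     """Column-wise search: find the first character column that contains a ':' in some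
--     line; the first line with ':' in that column carries the group's filename."""
--     width = max(map(len, block), default=0)
--     for k in range(width):
--         hit = None
--         for l in block:
--             if k < len(l) and l[k] == ':':
--                 hit = l
--                 break
--         if hit is not None:
--             prefix = hit[:k]
--             return {'file': prefix,
--                     'content': '\n'.join(l[k + 1:] if l.startswith(prefix) else l
--                                          for l in block)}
--     return None
--
-- def parse_grep_output(output):
--     lines = output.splitlines()
--     out = []
--     i = 0
--     while i < len(lines):
--         j = i
--         while j < len(lines) and lines[j].strip() != "--":
--             j += 1
--         m = _match(lines[i:j])
--         if m is not None:
--             out.append(m)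
--         i = j + 1
--     return out
-- ===== Notes on version B (the rewrite author's own statement) =====
-- stated objective: alternative
-- what changed: B finds each group's filename by a column-wise search (iterate character columns and take the first line with a colon in the first column that has one) instead of A's per-line first-colon minimum fold, and it forms groups by scanning ahead to the next separator line and slicing in an index-driven while loop instead of A's accumulate-and-flush pass over all lines.
import Mathlib
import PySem

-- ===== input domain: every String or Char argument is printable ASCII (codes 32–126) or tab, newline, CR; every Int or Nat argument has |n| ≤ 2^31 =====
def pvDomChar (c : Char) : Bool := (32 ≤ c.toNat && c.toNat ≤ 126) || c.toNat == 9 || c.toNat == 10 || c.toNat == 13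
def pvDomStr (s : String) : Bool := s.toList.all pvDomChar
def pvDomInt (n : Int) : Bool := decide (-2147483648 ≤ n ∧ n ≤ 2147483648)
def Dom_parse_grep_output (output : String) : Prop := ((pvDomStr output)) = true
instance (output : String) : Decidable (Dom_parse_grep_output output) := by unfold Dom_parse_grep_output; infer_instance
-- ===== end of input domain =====

-- B (objective 'alternative'): finds each group's filename by a column-wise search (first
-- character column containing a colon across the group) instead of A's per-line first-colon
-- minimum fold, and forms groups by scanning ahead to the next separator line and slicing
-- in an index-driven while loop instead of A's accumulate-and-flush pass.

-- ===== PORT A =====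
-- A phase 1: split lines into groups separated by lines stripping to "--"
def pgoA_split (lines : List String) : List (List String) :=
  let st := lines.foldl
    (fun (st : List (List String) × List String) line =>
      if PySem.Str.strip line == "--" then
        if st.2.isEmpty then st else (st.1 ++ [st.2], [])
      else (st.1, st.2 ++ [line])) ([], [])
  if st.2.isEmpty then st.1 else st.1 ++ [st.2]

-- A: the (candidate_prefix, min_colon_index) scan of one group
def pgoA_prefix (group : List String) : Option String × Option Int :=
  group.foldl
    (fun (st : Option String × Option Int) line =>
      let i := PySem.Str.find line ":"
      if i == -1 then st
      else
        match st.2 with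
        | none => (some (PySem.Str.slice line none (some i)), some i)
        | some m => if i < m then (some (PySem.Str.slice line none (some i)), some i) else st)
    (none, none)

def parse_grep_output (output : String) : List (List (String × String)) :=
  (pgoA_split (PySem.Str.splitlines output)).foldl
    (fun acc group =>
      match (pgoA_prefix group).1 with
      | none => acc
      | some pref =>
        let trim : Int := (PySem.Str.len pref : Int) + 1
        let contentLines := group.foldl
          (fun cl line =>
            if PySem.Str.startswith line pref then cl ++ [PySem.Str.slice line (some trim) none]
            else cl ++ [line]) []
        acc ++ [[("file", pref), ("content", PySem.Str.join "\n" contentLines)]]) []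

-- ===== PORT B =====
-- B: inner 'for l in block: if k < len(l) and l[k] == ':': hit = l; break'
def pgoB_colhit (block : List String) (k : Int) : Option String :=
  block.find? (fun l => decide (k < PySem.Str.len l) && (PySem.Str.pyGet? l k == some ':'))

-- B: 'for k in range(width): … return …' — first column with a colon wins
def pgoB_col (block : List String) : List Int → Option (Int × String)
  | [] => none
  | k :: ks =>
    match pgoB_colhit block k with
    | some hit => some (k, hit)
    | none => pgoB_col block ks

def pgoB_match (block : List String) : Option (List (String × String)) :=
  match pgoB_col block
      (PySem.List.pyRange 0 (PySem.List.maxD (block.map PySem.Str.len) (fun x => x) 0) 1) with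
  | none => none
  | some kh =>
    some [("file", PySem.Str.slice kh.2 none (some kh.1)),
          ("content", PySem.Str.join "\n" (block.map (fun l =>
            if PySem.Str.startswith l (PySem.Str.slice kh.2 none (some kh.1))
            then PySem.Str.slice l (some (kh.1 + 1)) none else l)))]

-- B: the outer while loop over line index i, scanning to the next separator and slicing
def pgoB_go : List String → List (List (String × String))
  | [] => []
  | l :: ls =>
    let block := (l :: ls).takeWhile (fun x => !(PySem.Str.strip x == "--"))
    let rest := ((l :: ls).dropWhile (fun x => !(PySem.Str.strip x == "--"))).drop 1
    (match pgoB_match block with | none => [] | some m => [m]) ++ pgoB_go rest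
  termination_by lines => lines.length
  decreasing_by
    simp only [List.length_drop]
    have := List.length_dropWhile_le (fun x => !(PySem.Str.strip x == "--")) (l :: ls)
    simp only [List.length_cons] at this ⊢
    omega

def parse_grep_output_alt (output : String) : List (List (String × String)) :=
  pgoB_go (PySem.Str.splitlines output)

-- ===== PRECONDITION & SPEC =====
def Spec_parse_grep_output (output : String) (out : List (List (String × String))) : Prop := out = parse_grep_output_alt output
instance (output : String) (out : List (List (String × String))) : Decidable (Spec_parse_grep_output output out) := by unfold Spec_parse_grep_output; infer_instance

-- ===== CLAIM (what is proved, stated in full; the proofs are below) =====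
def Claim_equal_parse_grep_output : Prop := ∀ (output : String), Dom_parse_grep_output output → Spec_parse_grep_output output (parse_grep_output output)

-- ===== LEMMAS AND PROOFS =====

-- proof-side: A's minimum scan as a single Option (Int × String) fold
def pgoB_best (block : List String) : Option (Int × String) :=
  block.foldl
    (fun (best : Option (Int × String)) line =>
      let i := PySem.Str.find line ":"
      if i != -1 && (match best with | none => true | some b => decide (i < b.1)) then
        some (i, PySem.Str.slice line none (some i))
      else best) none

-- one step of A's (candidate_prefix, min_colon_index) scan is one step of the pair scan
theorem pgo_prefix_step (b : Option (Int × String)) (l : String) :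
    (let i := PySem.Str.find l ":"
     if i == -1 then (b.map Prod.snd, b.map Prod.fst)
     else
       match (b.map Prod.snd, b.map Prod.fst).2 with
       | none => (some (PySem.Str.slice l none (some i)), some i)
       | some m => if i < m then (some (PySem.Str.slice l none (some i)), some i)
                   else (b.map Prod.snd, b.map Prod.fst))
    = ((let i := PySem.Str.find l ":"
        if i != -1 && (match b with | none => true | some p => decide (i < p.1)) then
          some (i, PySem.Str.slice l none (some i))
        else b).map Prod.snd,
       (let i := PySem.Str.find l ":"
        if i != -1 && (match b with | none => true | some p => decide (i < p.1)) then
          some (i, PySem.Str.slice l none (some i))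
        else b).map Prod.fst) := by
  cases b with
  | none =>
    by_cases h : PySem.Chars.find l.toList [':'] = -1 <;> simp [h]
  | some p =>
    by_cases h : PySem.Chars.find l.toList [':'] = -1
    · simp [h]
    · by_cases h2 : PySem.Chars.find l.toList [':'] < p.1 <;> simp [h, h2]

-- A's whole scan is the pair scan, component-wise
theorem pgo_prefix_rel (group : List String) (b : Option (Int × String)) :
    group.foldl
      (fun (st : Option String × Option Int) line =>
        let i := PySem.Str.find line ":"
        if i == -1 then st
        else
          match st.2 with
          | none => (some (PySem.Str.slice line none (some i)), some i)
          | some m => if i < m then (some (PySem.Str.slice line none (some i)), some i) else st)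
      (b.map Prod.snd, b.map Prod.fst)
    = ((group.foldl
        (fun (best : Option (Int × String)) line =>
          let i := PySem.Str.find line ":"
          if i != -1 && (match best with | none => true | some b => decide (i < b.1)) then
            some (i, PySem.Str.slice line none (some i))
          else best) b).map Prod.snd,
       (group.foldl
        (fun (best : Option (Int × String)) line =>
          let i := PySem.Str.find line ":"
          if i != -1 && (match best with | none => true | some b => decide (i < b.1)) then
            some (i, PySem.Str.slice line none (some i))
          else best) b).map Prod.fst) := by
  induction group generalizing b with
  | nil => rfl
  | cons l t ih =>
    rw [List.foldl_cons, List.foldl_cons, pgo_prefix_step b l]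
    exact ih _

theorem pgoA_prefix_fst (group : List String) :
    (pgoA_prefix group).1 = (pgoB_best group).map Prod.snd := by
  have h := pgo_prefix_rel group none
  exact congrArg Prod.fst h

-- A's content-building loop is a map
theorem pgo_content_map (group : List String) (pref : String) (trim : Int) :
    group.foldl
      (fun cl line =>
        if PySem.Str.startswith line pref then cl ++ [PySem.Str.slice line (some trim) none]
        else cl ++ [line]) []
    = group.map (fun l =>
        if PySem.Str.startswith l pref then PySem.Str.slice l (some trim) none else l) := by
  have h : ∀ (cl : List String) (line : String),
      (if PySem.Str.startswith line pref then cl ++ [PySem.Str.slice line (some trim) none]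
       else cl ++ [line])
      = cl ++ [if PySem.Str.startswith line pref then PySem.Str.slice line (some trim) none else line] := by
    intro cl line; split <;> rfl
  calc group.foldl _ []
      = group.foldl (fun cl line =>
          cl ++ [if PySem.Str.startswith line pref then PySem.Str.slice line (some trim) none else line]) [] := by
        induction group using List.reverseRecOn with
        | nil => rfl
        | append_singleton t l ih => rw [List.foldl_append, List.foldl_append, ih, List.foldl_cons, List.foldl_cons, List.foldl_nil, List.foldl_nil, h]
    _ = _ := by rw [PySem.List.foldl_append_singleton_eq_map]; rfl

theorem pgo_colon_prefix (cs : List Char) (j : Nat) : ([':'] <+: cs.drop j) ↔ cs[j]? = some ':' := by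
  rw [List.cons_prefix_iff]
  constructor
  · rintro ⟨t, ht, -⟩; rw [← List.head?_drop, ht]; rfl
  · intro h
    refine ⟨(cs.drop j).tail, ?_, List.nil_prefix⟩
    rw [← List.head?_drop] at h
    cases hd : cs.drop j with
    | nil => rw [hd] at h; simp at h
    | cons a t => rw [hd] at h; simp at h; rw [h]; rfl

theorem pgo_find_neg (s : String) : PySem.Str.find s ":" = -1 ↔ ':' ∉ s.toList := by
  rw [PySem.Str.find_eq, show (":" : String).toList = [':'] from rfl,
    PySem.Chars.find_eq_neg_one_iff]
  exact not_congr (List.singleton_infix_iff ':' s.toList)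

theorem pgo_find_spec (s : String) {n : Nat} (h : PySem.Str.find s ":" = (n : Int)) :
    s.toList[n]? = some ':' ∧ ∀ j < n, s.toList[j]? ≠ some ':' := by
  rw [PySem.Str.find_eq, show (":" : String).toList = [':'] from rfl] at h
  have h0 : 0 ≤ PySem.Chars.find s.toList [':'] := by rw [h]; exact Int.natCast_nonneg n
  obtain ⟨hp, hmin⟩ := PySem.Chars.find_spec h0
  have ht : (PySem.Chars.find s.toList [':']).toNat = n := by omega
  rw [ht] at hp hmin
  refine ⟨(pgo_colon_prefix _ _).1 hp, fun j hj hc => hmin j hj ((pgo_colon_prefix _ _).2 hc)⟩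

theorem pgo_find_le {s : String} {j : Nat} (hj : s.toList[j]? = some ':') :
    0 ≤ PySem.Str.find s ":" ∧ (PySem.Str.find s ":").toNat ≤ j := by
  rw [PySem.Str.find_eq, show (":" : String).toList = [':'] from rfl]
  have hne : PySem.Chars.find s.toList [':'] ≠ -1 := by
    intro hn
    rw [PySem.Chars.find_eq_neg_one_iff, List.singleton_infix_iff] at hn
    exact hn (List.mem_of_getElem? hj)
  have h0 : 0 ≤ PySem.Chars.find s.toList [':'] := by
    have := PySem.Chars.neg_one_le_find s.toList [':']
    omega
  obtain ⟨-, hmin⟩ := PySem.Chars.find_spec h0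
  refine ⟨h0, ?_⟩
  by_contra hlt
  exact hmin j (by omega) ((pgo_colon_prefix _ _).2 hj)


theorem pgo_best_append (t : List String) (x : String) :
    pgoB_best (t ++ [x]) =
      (if (PySem.Str.find x ":" != -1 &&
            (match pgoB_best t with | none => true | some b => decide (PySem.Str.find x ":" < b.1))) = true
       then some (PySem.Str.find x ":", PySem.Str.slice x none (some (PySem.Str.find x ":")))
       else pgoB_best t) := by
  unfold pgoB_best
  rw [List.foldl_append, List.foldl_cons, List.foldl_nil]

theorem pgo_find_ge_zero {x : String} (hx : PySem.Str.find x ":" ≠ -1) : 0 ≤ PySem.Str.find x ":" := by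
  have h1 := PySem.Chars.neg_one_le_find x.toList (":" : String).toList
  rw [← PySem.Str.find_eq] at h1
  omega

-- full characterization of the minimum scan: the stored pair is the first line achieving
-- the strictly smallest first-colon index; lines before it are strictly worse, lines after no better
theorem pgo_best_spec (g : List String) :
    (pgoB_best g = none → ∀ l ∈ g, PySem.Str.find l ":" = -1) ∧
    (∀ m pref, pgoB_best g = some (m, pref) →
      0 ≤ m ∧ ∃ pre l0 suf, g = pre ++ l0 :: suf ∧
        PySem.Str.find l0 ":" = m ∧ pref = PySem.Str.slice l0 none (some m) ∧
        (∀ l ∈ pre, PySem.Str.find l ":" = -1 ∨ m < PySem.Str.find l ":") ∧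
        (∀ l ∈ suf, PySem.Str.find l ":" = -1 ∨ m ≤ PySem.Str.find l ":")) := by
  induction g using List.reverseRecOn with
  | nil => exact ⟨fun _ l hl => absurd hl (List.not_mem_nil), fun m pref h => by simp [pgoB_best] at h⟩
  | append_singleton t x ih =>
    cases hb : pgoB_best t with
    | none =>
      by_cases hx : PySem.Str.find x ":" = -1
      · have hc : (PySem.Str.find x ":" != -1) = false := by rw [hx]; rfl
        have hstep : pgoB_best (t ++ [x]) = none := by
          simp only [pgo_best_append, hb, hc, Bool.false_and, Bool.false_eq_true, if_false]
        refine ⟨fun _ l hl => ?_, fun m pref h => absurd (hstep ▸ h) (by simp)⟩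
        rcases List.mem_append.1 hl with h1 | h1
        · exact (ih.1 hb) l h1
        · rw [List.mem_singleton.1 h1]; exact hx
      · have hc : (PySem.Str.find x ":" != -1) = true := bne_iff_ne.mpr hx
        have hstep : pgoB_best (t ++ [x])
            = some (PySem.Str.find x ":", PySem.Str.slice x none (some (PySem.Str.find x ":"))) := by
          simp only [pgo_best_append, hb, hc, Bool.and_true, if_true]
        refine ⟨fun hn => absurd (hstep ▸ hn) (by simp), fun m pref h => ?_⟩
        obtain ⟨hm, hp⟩ := Prod.mk.inj (Option.some.inj (hstep ▸ h).symm)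
        exact ⟨by rw [hm]; exact pgo_find_ge_zero hx, t, x, [], rfl, hm.symm,
          by rw [hm]; exact hp, fun l hl => Or.inl ((ih.1 hb) l hl),
          fun l hl => absurd hl (List.not_mem_nil)⟩
    | some b =>
      obtain ⟨m0, p0⟩ := b
      obtain ⟨hm00, pre0, l00, suf0, hg0, hf00, hp00, hpre0, hsuf0⟩ := ih.2 m0 p0 hb
      by_cases hwin : PySem.Str.find x ":" ≠ -1 ∧ PySem.Str.find x ":" < m0
      · have hc : (PySem.Str.find x ":" != -1) = true := bne_iff_ne.mpr hwin.1
        have hstep : pgoB_best (t ++ [x])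
            = some (PySem.Str.find x ":", PySem.Str.slice x none (some (PySem.Str.find x ":"))) := by
          simp only [pgo_best_append, hb, hc, decide_eq_true hwin.2, Bool.and_true, if_true]
        refine ⟨fun hn => absurd (hstep ▸ hn) (by simp), fun m pref h => ?_⟩
        obtain ⟨hm, hp⟩ := Prod.mk.inj (Option.some.inj (hstep ▸ h).symm)
        refine ⟨by rw [hm]; exact pgo_find_ge_zero hwin.1, t, x, [], rfl, hm.symm,
          by rw [hm]; exact hp, ?_, fun l hl => absurd hl (List.not_mem_nil)⟩
        intro l hl
        rw [hg0] at hl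
        rcases List.mem_append.1 hl with h1 | h1
        · rcases hpre0 l h1 with h2 | h2
          · exact Or.inl h2
          · exact Or.inr (by omega)
        · rcases List.mem_cons.1 h1 with h2 | h2
          · subst h2; exact Or.inr (by rw [hf00]; omega)
          · rcases hsuf0 l h2 with h3 | h3
            · exact Or.inl h3
            · exact Or.inr (by omega)
      · have hstep : pgoB_best (t ++ [x]) = some (m0, p0) := by
          rcases not_and_or.1 hwin with h1 | h1
          · have hc : (PySem.Str.find x ":" != -1) = false := by rw [not_not.1 h1]; rfl
            simp only [pgo_best_append, hb, hc, Bool.false_and, Bool.false_eq_true, if_false]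
          · simp only [pgo_best_append, hb, decide_eq_false h1, Bool.and_false,
              Bool.false_eq_true, if_false]
        refine ⟨fun hn => absurd (hstep ▸ hn) (by simp), fun m pref h => ?_⟩
        obtain ⟨hm, hp⟩ := Prod.mk.inj (Option.some.inj (hstep ▸ h).symm)
        subst hm; subst hp
        refine ⟨hm00, pre0, l00, suf0 ++ [x], by rw [hg0, List.append_assoc]; rfl, hf00, hp00, hpre0, ?_⟩
        intro l hl
        rcases List.mem_append.1 hl with h1 | h1
        · exact hsuf0 l h1
        · rw [List.mem_singleton.1 h1]
          rcases not_and_or.1 hwin with h2 | h2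
          · exact Or.inl (not_not.1 h2)
          · exact Or.inr (by omega)

-- the inner-line predicate at a nonnegative column k holds iff the line has ':' at k
theorem pgo_pred_iff (l : String) {k : Int} (hk : 0 ≤ k) :
    ((decide (k < PySem.Str.len l) && (PySem.Str.pyGet? l k == some ':')) = true)
      ↔ l.toList[k.toNat]? = some ':' := by
  obtain ⟨n, rfl⟩ : ∃ n : Nat, k = (n : Int) := ⟨k.toNat, by omega⟩
  rw [PySem.Str.pyGet?_eq, PySem.Chars.pyGet?_eq_listPyGet?,
    PySem.List.pyGet?_natCast l.toList n, Int.toNat_natCast]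
  constructor
  · intro h
    have h2 := Bool.and_elim_right h
    simpa using h2
  · intro h
    obtain ⟨hlt, -⟩ := List.getElem?_eq_some_iff.1 h
    have hlen : PySem.Str.len l = (l.toList.length : Int) := PySem.Str.len_eq l
    simp only [Bool.and_eq_true, decide_eq_true_eq, beq_iff_eq]
    exact ⟨by omega, h⟩

-- a group with no colons anywhere defeats every column
theorem pgo_col_none (g : List String) (h : ∀ l ∈ g, ':' ∉ l.toList) :
    ∀ ks, pgoB_col g ks = none := by
  intro ks
  induction ks with
  | nil => rfl
  | cons k ks ih =>
    have hhit : pgoB_colhit g k = none := by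
      unfold pgoB_colhit
      refine List.find?_eq_none.2 fun l hl hp => ?_
      have h2 : PySem.Str.pyGet? l k = some ':' := by
        have := Bool.and_elim_right hp; simpa using this
      rw [PySem.Str.pyGet?_eq, PySem.Chars.pyGet?_eq_listPyGet?] at h2
      exact h l hl (PySem.List.mem_of_pyGet?_eq_some _ h2)
    simp only [pgoB_col, hhit]
    exact ih

-- columns that all miss can be skipped
theorem pgo_col_skip (g : List String) {ks1 ks2 : List Int}
    (h : ∀ k ∈ ks1, pgoB_colhit g k = none) :
    pgoB_col g (ks1 ++ ks2) = pgoB_col g ks2 := by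
  induction ks1 with
  | nil => rfl
  | cons k ks ih =>
    simp only [List.cons_append, pgoB_col, h k List.mem_cons_self]
    exact ih fun k' hk' => h k' (List.mem_cons_of_mem _ hk')

-- B's column-wise search returns exactly A's minimum-scan result
theorem pgo_match_eq (g : List String) :
    pgoB_match g =
      (match pgoB_best g with
       | none => none
       | some mp => some [("file", mp.2),
           ("content", PySem.Str.join "\n" (g.map (fun l =>
             if PySem.Str.startswith l mp.2
             then PySem.Str.slice l (some (PySem.Str.len mp.2 + 1)) none else l)))]) := by
  cases hb : pgoB_best g with
  | none =>
    have hall := (pgo_best_spec g).1 hb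
    unfold pgoB_match
    rw [pgo_col_none g (fun l hl => (pgo_find_neg l).1 (hall l hl)) _]
  | some mp =>
    obtain ⟨m, pref⟩ := mp
    obtain ⟨hm0, pre, l0, suf, hg, hf0, hpref, hpre, hsuf⟩ := (pgo_best_spec g).2 m pref hb
    have hfn : PySem.Str.find l0 ":" = ((m.toNat : Nat) : Int) := by rw [hf0]; omega
    obtain ⟨hat, hmin⟩ := pgo_find_spec l0 hfn
    obtain ⟨hlt0, -⟩ := List.getElem?_eq_some_iff.1 hat
    have hmem_l0 : l0 ∈ g := by rw [hg]; exact List.mem_append_right _ List.mem_cons_self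
    have hlen_l0 : PySem.Str.len l0 = (l0.toList.length : Int) := PySem.Str.len_eq l0
    -- every line of g has its first colon no earlier than column m
    have hge : ∀ l ∈ g, PySem.Str.find l ":" = -1 ∨ m ≤ PySem.Str.find l ":" := by
      intro l hl
      rw [hg] at hl
      rcases List.mem_append.1 hl with h1 | h1
      · rcases hpre l h1 with h2 | h2
        · exact Or.inl h2
        · exact Or.inr (le_of_lt h2)
      · rcases List.mem_cons.1 h1 with h2 | h2
        · subst h2; exact Or.inr (by omega)
        · exact hsuf l h2
    -- (i) every column strictly before m misses
    have hlow : ∀ k ∈ PySem.List.pyRange 0 m 1, pgoB_colhit g k = none := by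
      intro k hk
      obtain ⟨hk0, hkm⟩ := PySem.List.mem_pyRange_one.1 hk
      unfold pgoB_colhit
      refine List.find?_eq_none.2 fun l hl hp => ?_
      have hcol := (pgo_pred_iff l hk0).1 hp
      obtain ⟨h0f, hle⟩ := pgo_find_le hcol
      rcases hge l hl with h1 | h1 <;> omega
    -- (iii)+(ii): at column m, the first hit is l0
    have hhit : pgoB_colhit g m = some l0 := by
      unfold pgoB_colhit
      rw [hg, List.find?_append]
      have hpre_none : List.find?
          (fun l => decide (m < PySem.Str.len l) && (PySem.Str.pyGet? l m == some ':')) pre = none := by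
        refine List.find?_eq_none.2 fun l hl hp => ?_
        have hcol := (pgo_pred_iff l hm0).1 hp
        obtain ⟨h0f, hle⟩ := pgo_find_le hcol
        rcases hpre l hl with h1 | h1 <;> omega
      rw [hpre_none, Option.none_or]
      exact List.find?_cons_of_pos ((pgo_pred_iff l0 hm0).2 hat)
    -- (iv) m is inside the scanned range of columns
    have hW : m < PySem.List.maxD (g.map PySem.Str.len) (fun x => x) 0 := by
      cases hmx : PySem.List.max? (g.map PySem.Str.len) (fun x => x) with
      | none =>
        have := (PySem.List.max?_eq_none_iff _ _).1 hmx
        rw [List.map_eq_nil_iff, hg] at this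
        exact absurd this (by simp)
      | some w =>
        have hle := PySem.List.max?_isMax hmx (PySem.Str.len l0) (List.mem_map_of_mem hmem_l0)
        have hWw : PySem.List.maxD (g.map PySem.Str.len) (fun x => x) 0 = w := by
          unfold PySem.List.maxD; rw [hmx]; rfl
        simp only at hle
        omega
    -- assemble the column search result
    have hcol : pgoB_col g
        (PySem.List.pyRange 0 (PySem.List.maxD (g.map PySem.Str.len) (fun x => x) 0) 1)
        = some (m, l0) := by
      rw [PySem.List.pyRange_one_append 0 m _ hm0 (le_of_lt hW),
        pgo_col_skip g hlow, PySem.List.pyRange_one_cons hW]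
      simp only [pgoB_col, hhit]
    have hlenpref : PySem.Str.len pref = m := by
      rw [hpref, PySem.Str.len_eq, PySem.Str.toList_slice, PySem.Chars.slice_eq_listSlice,
        PySem.List.slice_to l0.toList hm0, List.length_take]
      omega
    unfold pgoB_match
    rw [hcol]
    rw [hpref] at hlenpref
    simp only [hpref, hlenpref]

-- A's per-group processing, one group at a time
def pgoProcOne (g : List String) : List (List (String × String)) :=
  match (pgoA_prefix g).1 with
  | none => []
  | some pref =>
    [[("file", pref), ("content", PySem.Str.join "\n" (g.foldl
        (fun cl line =>
          if PySem.Str.startswith line pref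
          then cl ++ [PySem.Str.slice line (some ((PySem.Str.len pref : Int) + 1)) none]
          else cl ++ [line]) []))]]

theorem pgo_foldl_eq_flatMap {α β : Type} (f : List β → α → List β) (g : α → List β)
    (h : ∀ acc x, f acc x = acc ++ g x) (l : List α) (acc : List β) :
    l.foldl f acc = acc ++ l.flatMap g := by
  induction l generalizing acc with
  | nil => simp
  | cons x t ih => rw [List.foldl_cons, h, ih, List.flatMap_cons, List.append_assoc]

-- per group, A's processing is exactly B's column-wise match
theorem pgo_procOne_eq (g : List String) :
    pgoProcOne g = (match pgoB_match g with | none => [] | some m => [m]) := by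
  unfold pgoProcOne
  rw [pgoA_prefix_fst, pgo_match_eq]
  cases hb : pgoB_best g with
  | none => rfl
  | some mp =>
    simp only [Option.map_some]
    rw [pgo_content_map g mp.2 (PySem.Str.len mp.2 + 1)]

theorem pgo_opt_block (g : List String) :
    (if g.isEmpty then [] else [g]).flatMap pgoProcOne
      = (match pgoB_match g with | none => [] | some m => [m]) := by
  cases hg0 : g.isEmpty with
  | true =>
    rw [List.isEmpty_iff.1 hg0]
    rfl
  | false =>
    simp only [Bool.false_eq_true, if_false, List.flatMap_cons, List.flatMap_nil,
      List.append_nil]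
    exact pgo_procOne_eq g

-- A's grouping fold only ever appends to its accumulator
theorem pgo_split_acc (xs : List String) : ∀ (acc : List (List String)) (cur : List String),
    xs.foldl
      (fun (st : List (List String) × List String) line =>
        if PySem.Str.strip line == "--" then
          if st.2.isEmpty then st else (st.1 ++ [st.2], [])
        else (st.1, st.2 ++ [line])) (acc, cur)
    = (acc ++ (xs.foldl
        (fun (st : List (List String) × List String) line =>
          if PySem.Str.strip line == "--" then
            if st.2.isEmpty then st else (st.1 ++ [st.2], [])
          else (st.1, st.2 ++ [line])) ([], cur)).1,
       (xs.foldl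
        (fun (st : List (List String) × List String) line =>
          if PySem.Str.strip line == "--" then
            if st.2.isEmpty then st else (st.1 ++ [st.2], [])
          else (st.1, st.2 ++ [line])) ([], cur)).2) := by
  induction xs with
  | nil => intro acc cur; simp
  | cons x t ih =>
    intro acc cur
    rw [List.foldl_cons, List.foldl_cons]
    by_cases hsep : (PySem.Str.strip x == "--") = true
    · by_cases hcur : cur.isEmpty = true
      · simp only [hsep, hcur, if_true]
        exact ih acc cur
      · simp only [hsep, hcur, if_true, Bool.false_eq_true, if_false, List.nil_append]
        rw [ih (acc ++ [cur]) [], ih [cur] []]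
        simp [List.append_assoc]
    · simp only [hsep, Bool.false_eq_true, if_false]
      exact ih acc (cur ++ [x])

-- lines before the first separator are just accumulated
theorem pgo_split_take (xs : List String) (h : ∀ x ∈ xs, (PySem.Str.strip x == "--") = false) :
    ∀ (acc : List (List String)) (cur : List String),
    xs.foldl
      (fun (st : List (List String) × List String) line =>
        if PySem.Str.strip line == "--" then
          if st.2.isEmpty then st else (st.1 ++ [st.2], [])
        else (st.1, st.2 ++ [line])) (acc, cur)
    = (acc, cur ++ xs) := by
  induction xs with
  | nil => intro acc cur; simp
  | cons x t ih =>
    intro acc cur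
    rw [List.foldl_cons]
    simp only [h x List.mem_cons_self, Bool.false_eq_true, if_false]
    rw [ih (fun y hy => h y (List.mem_cons_of_mem _ hy)) acc (cur ++ [x])]
    simp

theorem pgo_dropWhile_head {p : String → Bool} {l : List String} {s : String} {rest : List String}
    (hr : l.dropWhile p = s :: rest) : p s = false := by
  induction l with
  | nil => simp at hr
  | cons x t ih =>
    rw [List.dropWhile_cons] at hr
    by_cases hx : p x = true
    · rw [if_pos hx] at hr; exact ih hr
    · rw [if_neg hx] at hr
      obtain ⟨h1, -⟩ := List.cons.inj hr
      rw [← h1]; exact Bool.eq_false_iff.mpr hx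

-- A's split, unrolled one group at a time (the shape of B's while loop)
theorem pgo_split_rec (l : String) (ls : List String) :
    pgoA_split (l :: ls) =
      (if ((l :: ls).takeWhile (fun x => !(PySem.Str.strip x == "--"))).isEmpty then []
       else [(l :: ls).takeWhile (fun x => !(PySem.Str.strip x == "--"))]) ++
      (match (l :: ls).dropWhile (fun x => !(PySem.Str.strip x == "--")) with
       | [] => []
       | _ :: rest' => pgoA_split rest') := by
  have hmem : ∀ x ∈ (l :: ls).takeWhile (fun x => !(PySem.Str.strip x == "--")),
      (PySem.Str.strip x == "--") = false := by
    intro x hx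
    have := List.mem_takeWhile_imp hx
    simpa using this
  conv_lhs => rw [pgoA_split, show (l :: ls) = (l :: ls).takeWhile (fun x => !(PySem.Str.strip x == "--")) ++ (l :: ls).dropWhile (fun x => !(PySem.Str.strip x == "--")) from List.takeWhile_append_dropWhile.symm]
  rw [List.foldl_append, pgo_split_take _ hmem [] []]
  cases hr : (l :: ls).dropWhile (fun x => !(PySem.Str.strip x == "--")) with
  | nil =>
    simp only [List.foldl_nil, List.nil_append, List.append_nil]
  | cons s rest' =>
    have hs : (PySem.Str.strip s == "--") = true := by
      have := pgo_dropWhile_head hr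
      simpa using this
    rw [List.foldl_cons]
    simp only [List.nil_append, hs, if_true]
    by_cases hb : ((l :: ls).takeWhile (fun x => !(PySem.Str.strip x == "--"))).isEmpty = true
    · simp only [hb, if_true]
      rw [List.isEmpty_iff.1 hb]
      simp only [List.nil_append]
      rfl
    · simp only [hb, Bool.false_eq_true, if_false]
      rw [pgo_split_acc rest' _ []]
      unfold pgoA_split
      cases h2 : ((rest'.foldl
        (fun (st : List (List String) × List String) line =>
          if PySem.Str.strip line == "--" then
            if st.2.isEmpty then st else (st.1 ++ [st.2], [])
          else (st.1, st.2 ++ [line])) ([], [])).2).isEmpty with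
      | true => simp only [h2, if_true]
      | false => simp only [h2, Bool.false_eq_true, if_false, List.append_assoc]

-- main: processing A's groups left to right is B's while loop
theorem pgo_main (lines : List String) :
    (pgoA_split lines).flatMap pgoProcOne = pgoB_go lines := by
  induction lines using pgoB_go.induct with
  | case1 =>
    show List.flatMap pgoProcOne (pgoA_split []) = pgoB_go []
    simp [pgoB_go, pgoA_split]
  | case2 l ls x ih =>
    have hx : x = (List.dropWhile (fun x => !(PySem.Str.strip x == "--")) (l :: ls)).drop 1 := rfl
    clear_value x
    subst hx
    rw [pgo_split_rec l ls, List.flatMap_append, pgo_opt_block]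
    rw [pgoB_go.eq_2 l ls]
    refine congrArg₂ (fun a b => a ++ b) rfl ?_
    cases hr : (l :: ls).dropWhile (fun x => !(PySem.Str.strip x == "--")) with
    | nil =>
      simp only [List.drop_nil, pgoB_go.eq_1]
      rfl
    | cons s rest' =>
      rw [hr] at ih
      have hd : List.drop 1 (s :: rest') = rest' := rfl
      rw [hd] at ih ⊢
      exact ih

-- ===== VERDICT (by name: the statement is the Claim_ definition above) =====
theorem parse_grep_output_spec : Claim_equal_parse_grep_output := by
  intro output _
  unfold Spec_parse_grep_output parse_grep_output parse_grep_output_alt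
  rw [pgo_foldl_eq_flatMap _ pgoProcOne (fun acc g => by
      unfold pgoProcOne
      cases h : (pgoA_prefix g).1 with
      | none => simp
      | some pref => simp) (pgoA_split (PySem.Str.splitlines output)) []]
  rw [List.nil_append]
  exact pgo_main _
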